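-- pv_equiv track=rewrite | github.com/thekakkun/coding_challenges | project_euler/level_1/p017.py | p017
-- ===== SOURCE A (Python) =====
-- def p017(n):
--     """Number letter counts
--
--     Problem 17
--
--     If the numbers 1 to 5 are written out in words: one, two, three, four, five, then there are 3 + 3 + 5 + 4 + 4 = 19 letters used in total.
--
--     If all the numbers from 1 to 1000 (one thousand) inclusive were written out in words, how many letters would be used?
--
--     NOTE: Do not count spaces or hyphens. For example, 342 (three hundred and forty-two) contains 23 letters and 115 (one hundred and fifteen) contains 20 letters. The use of "and" when writing out numbers is in compliance with British usage.
--     """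
--
--     special_names = {
--         1: 'one',
--         2: 'two',
--         3: 'three',
--         4: 'four',
--         5: 'five',
--         6: 'six',
--         7: 'seven',
--         8: 'eight',
--         9: 'nine',
--         10: 'ten',
--         11: 'eleven',
--         12: 'twelve',
--         13: 'thirteen',
--         14: 'fourteen',
--         15: 'fifteen',
--         16: 'sixteen',
--         17: 'seventeen',
--         18: 'eighteen',
--         19: 'nineteen',
--         20: 'twenty',
--         30: 'thirty',
--         40: 'forty',
--         50: 'fifty',
--         60: 'sixty',
--         70: 'seventy',
--         80: 'eighty',
--         90: 'ninety',
--     }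
--
--     units = {
--         100: 'hundred',
--         1000: 'thousand'
--     }
--     written_number = {}
--
--     for i in range(1, n + 1):
--         written_number[i] = ''
--
--         current_number = i
--         if current_number == 0:
--             continue
--
--         while [x for x in units.keys() if x <= current_number]:
--             unit = max([x for x in units.keys() if x <= current_number])
--             digit = current_number // unit
--
--             written_number[i] += (special_names[digit] + units[unit])
--             current_number -= digit * unit
--
--             if unit == 100 and current_number != 0:
--                 written_number[i] += 'and'
--
--         specials_list = [x for x in special_names.keys() if x <=
--                          current_number]
--
--         while specials_list:
--             written_number[i] += special_names[max(specials_list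
--                                                    )]
--
--             current_number -= max(specials_list
--                                   )
--             specials_list = [
--                 x for x in special_names.keys() if x <= current_number]
--
--     return sum([len(written_number[x]) for x in written_number.keys()])
-- ===== SOURCE B (Python) =====
-- def p017(n):
--     """Number letter counts: sum letter counts of 1..n written in British words.
--
--     Instead of greedily building each number's word string, compute the letter
--     count of each number directly from its positional digits via length tables.
--     """
--     ones = {0: 0, 1: 3, 2: 3, 3: 5, 4: 4, 5: 4, 6: 3, 7: 5, 8: 5, 9: 4,
--             10: 3, 11: 6, 12: 6, 13: 8, 14: 8, 15: 7, 16: 7, 17: 9,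
--             18: 8, 19: 8, 20: 6}
--     tens = {2: 6, 3: 6, 4: 5, 5: 5, 6: 5, 7: 7, 8: 6, 9: 6}
--
--     def two(v):
--         # letters of a number 0..99 (greedy split = teens table or tens+ones)
--         return ones[v] if v < 21 else tens[v // 10] + ones[v % 10]
--
--     def count(i):
--         t, r = divmod(i, 1000)
--         h, v = divmod(r, 100)
--         c = two(v)
--         if h != 0:
--             c += ones[h] + 7 + (3 if v != 0 else 0)   # 'hundred', 'and'
--         if t != 0:
--             c += two(t) + 8                            # 'thousand'
--         return c
--
--     return sum(count(i) for i in range(1, n + 1))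
-- ===== Notes on version B (the rewrite author's own statement) =====
-- stated objective: faster
-- what changed: A builds each number's actual word string via greedy while-loops that repeatedly scan the name-dict keys, storing all words in a dict and summing their lengths at the end; B never builds a string: it decomposes each i positionally (i//1000, i%1000//100, i%100) and sums letter counts straight from two length tables.
-- outside the precondition, e.g. on p017(21000): A raises KeyError, B returns 715390
import Mathlib
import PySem

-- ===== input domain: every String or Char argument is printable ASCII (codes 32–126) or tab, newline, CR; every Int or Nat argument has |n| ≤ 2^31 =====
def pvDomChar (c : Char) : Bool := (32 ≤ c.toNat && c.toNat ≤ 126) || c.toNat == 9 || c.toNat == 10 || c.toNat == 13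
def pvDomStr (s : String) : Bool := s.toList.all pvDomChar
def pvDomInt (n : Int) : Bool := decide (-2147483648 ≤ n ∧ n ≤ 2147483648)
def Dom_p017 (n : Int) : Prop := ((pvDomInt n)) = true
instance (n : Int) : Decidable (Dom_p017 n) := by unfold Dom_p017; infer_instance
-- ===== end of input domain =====

-- B replaces A's per-number greedy word-building (two while loops producing the
-- actual word strings, stored in a dict) by a direct positional letter-count
-- from digit tables: no strings and no dict are built (objective: faster by a
-- constant factor, measured).

-- ===== PORT A =====
def snamesA : PySem.Dict Int String := PySem.Dict.ofList
  [(1, "one"), (2, "two"), (3, "three"), (4, "four"), (5, "five"), (6, "six"),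
   (7, "seven"), (8, "eight"), (9, "nine"), (10, "ten"), (11, "eleven"),
   (12, "twelve"), (13, "thirteen"), (14, "fourteen"), (15, "fifteen"),
   (16, "sixteen"), (17, "seventeen"), (18, "eighteen"), (19, "nineteen"),
   (20, "twenty"), (30, "thirty"), (40, "forty"), (50, "fifty"), (60, "sixty"),
   (70, "seventy"), (80, "eighty"), (90, "ninety")]
def unitsA : PySem.Dict Int String := PySem.Dict.ofList
  [(100, "hundred"), (1000, "thousand")]
def unitsLoopA (fuel : Nat) (current : Int) (w : String) : String × Int :=
  match fuel with
  | 0 => (w, current)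
  | fuel + 1 =>
    let cand := unitsA.keys.filter (fun x => decide (x ≤ current))
    if cand.isEmpty then (w, current)
    else
      let unit := (PySem.List.max? cand (fun x => x)).getD 0
      let digit := PySem.Int.floordiv current unit
      let w := w ++ (snamesA.getD digit "" ++ unitsA.getD unit "")
      let current := current - digit * unit
      let w := if unit == 100 && current != 0 then w ++ "and" else w
      unitsLoopA fuel current w
def specialsLoopA (fuel : Nat) (current : Int) (w : String) : String :=
  match fuel with
  | 0 => w
  | fuel + 1 =>
    let sl := snamesA.keys.filter (fun x => decide (x ≤ current))
    if sl.isEmpty then w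
    else
      let m := (PySem.List.max? sl (fun x => x)).getD 0
      specialsLoopA fuel (current - m) (w ++ snamesA.getD m "")
def wordForA (i : Int) : String :=
  let p := unitsLoopA 100 i ""
  specialsLoopA 100 p.2 p.1
-- written_number is ported as an insertion-ordered association list (the Python
-- dict): its keys 1..n are distinct and each is written in exactly one loop
-- iteration, which records that iteration's final word (first '' on entry, then
-- the words appended by the two while loops); the closing sum reads the entries
-- in the same insertion order as Python's keys() loop (wn is accumulated in
-- reverse and reversed once, the standard foldl list-building shape).
def p017 (n : Int) : Int :=
  let wn := (PySem.List.pyRange 1 (n + 1) 1).foldl (fun wn i =>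
      if i == 0 then (i, "") :: wn else (i, wordForA i) :: wn)
    ([] : List (Int × String))
  (wn.reverse.map (fun p => PySem.Str.len p.2)).sum

-- ===== PORT B =====
def onesB : PySem.Dict Int Int := PySem.Dict.ofList
  [(0, 0), (1, 3), (2, 3), (3, 5), (4, 4), (5, 4), (6, 3), (7, 5), (8, 5),
   (9, 4), (10, 3), (11, 6), (12, 6), (13, 8), (14, 8), (15, 7), (16, 7),
   (17, 9), (18, 8), (19, 8), (20, 6)]
def tensB : PySem.Dict Int Int := PySem.Dict.ofList
  [(2, 6), (3, 6), (4, 5), (5, 5), (6, 5), (7, 7), (8, 6), (9, 6)]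
def twoB (v : Int) : Int :=
  if v < 21 then onesB.getD v 0
  else tensB.getD (PySem.Int.floordiv v 10) 0 + onesB.getD (PySem.Int.mod v 10) 0
def countB (i : Int) : Int :=
  let t := PySem.Int.floordiv i 1000
  let r := PySem.Int.mod i 1000
  let h := PySem.Int.floordiv r 100
  let v := PySem.Int.mod r 100
  let c := twoB v
  let c := if h ≠ 0 then c + onesB.getD h 0 + 7 + (if v ≠ 0 then 3 else 0) else c
  let c := if t ≠ 0 then c + twoB t + 8 else c
  c

def p017_alt (n : Int) : Int :=
  (PySem.List.pyRange 1 (n + 1) 1).foldl (fun total i => total + countB i) 0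

-- ===== PRECONDITION & SPEC =====
-- Pre_ excludes exactly n ≥ 21000: there A's loop reaches i = 21000, whose
-- thousands digit is not a key of special_names, so A raises KeyError
-- (A returns normally on every n ≤ 20999, including n ≤ 0, where the sum is 0).
def Pre_p017 (n : Int) : Prop := n ≤ 20999
instance (n : Int) : Decidable (Pre_p017 n) := by unfold Pre_p017; infer_instance
def pvWitness_p017 : Int := 342

def Spec_p017 (n : Int) (out : Int) : Prop := out = p017_alt n
instance (n : Int) (out : Int) : Decidable (Spec_p017 n out) := by unfold Spec_p017; infer_instance

-- ===== CLAIM (what is proved, stated in full; the proofs are below) =====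
def Claim_equal_p017 : Prop := ∀ (n : Int), Dom_p017 n → Pre_p017 n → Spec_p017 n (p017 n)

-- ===== LEMMAS AND PROOFS =====
theorem specialsLoopA_len (f : Nat) (v : Int) (acc : String) :
    PySem.Str.len (specialsLoopA f v acc)
      = PySem.Str.len acc + PySem.Str.len (specialsLoopA f v "") := by
  induction f generalizing v acc with
  | zero => simp [specialsLoopA]
  | succ f ih =>
    rw [specialsLoopA, specialsLoopA]
    by_cases h : (snamesA.keys.filter (fun x => decide (x ≤ v))).isEmpty
    · simp [h]
    · simp only [h, if_neg, Bool.false_eq_true, not_false_iff]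
      rw [ih, ih ((v - _)) ("" ++ _)]
      simp
      ring

set_option maxRecDepth 4096 in
theorem specialsLoopA_two : ∀ v : Nat, v < 100 →
    PySem.Str.len (specialsLoopA 100 (v : Int) "") = twoB (v : Int) := by
  decide

set_option maxRecDepth 4096 in
theorem snames_len' : ∀ d : Nat, d < 21 → 1 ≤ d →
    PySem.Str.len (snamesA.getD (d : Int) "") = onesB.getD (d : Int) 0 := by
  decide

theorem keysUnits : unitsA.keys = [100, 1000] := by decide

theorem unitsLoopA_small (f : Nat) (c : Int) (acc : String) (h : c < 100) :
    unitsLoopA (f + 1) c acc = (acc, c) := by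
  have d1 : decide ((100:Int) ≤ c) = false := decide_eq_false (by omega)
  have d2 : decide ((1000:Int) ≤ c) = false := decide_eq_false (by omega)
  have hf : unitsA.keys.filter (fun x => decide (x ≤ c)) = [] := by
    rw [keysUnits]; simp [List.filter, d1, d2]
  rw [unitsLoopA]
  simp [hf]

theorem unitsLoopA_hundreds (f : Nat) (c : Int) (acc : String)
    (h1 : 100 ≤ c) (h2 : c < 1000) :
    unitsLoopA (f + 2) c acc =
      ((if (100 : Int) == 100 && (c - PySem.Int.floordiv c 100 * 100) != 0 then
          acc ++ (snamesA.getD (PySem.Int.floordiv c 100) "" ++ "hundred") ++ "and"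
        else acc ++ (snamesA.getD (PySem.Int.floordiv c 100) "" ++ "hundred")),
       c - PySem.Int.floordiv c 100 * 100) := by
  have d1 : decide ((100:Int) ≤ c) = true := decide_eq_true (by omega)
  have d2 : decide ((1000:Int) ≤ c) = false := decide_eq_false (by omega)
  have hf : unitsA.keys.filter (fun x => decide (x ≤ c)) = [100] := by
    rw [keysUnits]; simp [List.filter, d1, d2]
  have hmod : c - PySem.Int.floordiv c 100 * 100 < 100 := by
    rw [PySem.Int.floordiv_eq_ediv_of_pos (by omega)]; omega
  have hmax : (PySem.List.max? ([100] : List Int) (fun x => x)).getD 0 = 100 := by decide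
  have hg : unitsA.getD (100 : Int) "" = "hundred" := by decide
  have hemp : (([100] : List Int).isEmpty = true) = False := by simp
  rw [unitsLoopA]
  simp only [hf, hmax, hg, hemp, if_false]
  rw [unitsLoopA_small (f := f) (h := hmod)]

theorem unitsLoopA_thousands (f : Nat) (c : Int) (acc : String) (h : 1000 ≤ c) :
    unitsLoopA (f + 1) c acc =
      unitsLoopA f (c - PySem.Int.floordiv c 1000 * 1000)
        (acc ++ (snamesA.getD (PySem.Int.floordiv c 1000) "" ++ "thousand")) := by
  have d1 : decide ((100:Int) ≤ c) = true := decide_eq_true (by omega)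
  have d2 : decide ((1000:Int) ≤ c) = true := decide_eq_true (by omega)
  have hf : unitsA.keys.filter (fun x => decide (x ≤ c)) = [100, 1000] := by
    rw [keysUnits]; simp [List.filter, d1, d2]
  have hmax : (PySem.List.max? ([100, 1000] : List Int) (fun x => x)).getD 0 = 1000 := by decide
  have hg : unitsA.getD (1000 : Int) "" = "thousand" := by decide
  have hemp : (([100, 1000] : List Int).isEmpty = true) = False := by simp
  have hbeq : ((1000 : Int) == 100) = false := by decide
  rw [unitsLoopA]
  simp only [hf, hmax, hg, hemp, if_false, hbeq, Bool.false_and, Bool.false_eq_true]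

-- helper: specials on 0 ≤ v < 100 starting from acc
theorem specials_len (v : Int) (acc : String) (h0 : 0 ≤ v) (hlt : v < 100) :
    PySem.Str.len (specialsLoopA 100 v acc) = PySem.Str.len acc + twoB v := by
  have hv : ((v.toNat : Nat) : Int) = v := by omega
  rw [specialsLoopA_len, ← hv, specialsLoopA_two v.toNat (by omega)]


theorem countB_eq (i : Int) :
    countB i = twoB (i % 1000 % 100)
      + (if i % 1000 / 100 = 0 then 0
         else onesB.getD (i % 1000 / 100) 0 + 7 + (if i % 1000 % 100 = 0 then 0 else 3))
      + (if i / 1000 = 0 then 0 else twoB (i / 1000) + 8) := by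
  simp only [countB]
  rw [PySem.Int.floordiv_eq_ediv_of_pos (a := i) (b := 1000) (by omega),
      PySem.Int.mod_eq_emod_of_pos (a := i) (b := 1000) (by omega),
      PySem.Int.floordiv_eq_ediv_of_pos (a := i % 1000) (b := 100) (by omega),
      PySem.Int.mod_eq_emod_of_pos (a := i % 1000) (b := 100) (by omega)]
  split_ifs <;> omega

theorem len_hundred : PySem.Str.len "hundred" = 7 := by decide
theorem len_thousand : PySem.Str.len "thousand" = 8 := by decide
theorem len_and : PySem.Str.len "and" = 3 := by decide
theorem len_nil : PySem.Str.len "" = 0 := by decide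

theorem word_len_eq_count (i : Int) (h1 : 1 ≤ i) (h2 : i ≤ 20999) :
    PySem.Str.len (wordForA i) = countB i := by
  rw [wordForA, countB_eq i]
  by_cases hc1 : i < 100
  · -- i < 100: the units loop does not run
    rw [show (100:Nat) = 99 + 1 from rfl, unitsLoopA_small _ _ _ hc1]
    dsimp only
    have e1 : i % 1000 = i := by omega
    have e2 : i / 100 = 0 := by omega
    have e3 : i / 1000 = 0 := by omega
    have e4 : i % 100 = i := by omega
    rw [specials_len i "" (by omega) hc1, e1, e2, e3, e4, len_nil]
    simp
  · by_cases hc2 : i < 1000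
    · -- one hundreds step
      rw [show (100:Nat) = 98 + 2 from rfl,
          unitsLoopA_hundreds _ _ _ (by omega) hc2]
      dsimp only
      have hdiv : PySem.Int.floordiv i 100 = i / 100 :=
        PySem.Int.floordiv_eq_ediv_of_pos (by omega)
      have hrem : i - PySem.Int.floordiv i 100 * 100 = i % 100 := by rw [hdiv]; omega
      have e1 : i % 1000 = i := by omega
      have e3 : i / 1000 = 0 := by omega
      have hcast : (((i / 100).toNat : Nat) : Int) = i / 100 := by omega
      have hname : PySem.Str.len (snamesA.getD (i / 100) "") = onesB.getD (i / 100) 0 := by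
        rw [← hcast]; exact snames_len' _ (by omega) (by omega)
      rw [hrem, hdiv, e1, e3]
      rw [specials_len _ _ (by omega) (by omega)]
      by_cases hv : i % 100 = 0
      · rw [if_neg (by simp [hv])]
        simp only [PySem.Str.len_append, hname, len_hundred, len_nil]
        split_ifs <;> omega
      · rw [if_pos (by simp [hv])]
        simp only [PySem.Str.len_append, hname, len_hundred, len_and, len_nil]
        split_ifs <;> omega
    · -- a thousands step first
      rw [show (100:Nat) = 99 + 1 from rfl,
          unitsLoopA_thousands _ _ _ (by omega)]
      have tdiv : PySem.Int.floordiv i 1000 = i / 1000 :=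
        PySem.Int.floordiv_eq_ediv_of_pos (by omega)
      have trem : i - PySem.Int.floordiv i 1000 * 1000 = i % 1000 := by rw [tdiv]; omega
      have htc : (((i / 1000).toNat : Nat) : Int) = i / 1000 := by omega
      have hnamet : PySem.Str.len (snamesA.getD (i / 1000) "") = onesB.getD (i / 1000) 0 := by
        rw [← htc]; exact snames_len' _ (by omega) (by omega)
      have htwo : twoB (i / 1000) = onesB.getD (i / 1000) 0 := by
        rw [twoB, if_pos (by omega)]
      rw [trem, tdiv]
      by_cases hr : i % 1000 < 100
      · rw [show (99:Nat) = 98 + 1 from rfl, unitsLoopA_small _ _ _ hr]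
        dsimp only
        rw [specials_len _ _ (by omega) hr]
        have e2 : i % 1000 / 100 = 0 := by omega
        have e4 : i % 1000 % 100 = i % 1000 := by omega
        simp only [e2, e4, PySem.Str.len_append, hnamet, htwo, len_thousand, len_nil]
        split_ifs <;> omega
      · rw [show (99:Nat) = 97 + 2 from rfl,
            unitsLoopA_hundreds _ _ _ (by omega) (by omega)]
        dsimp only
        have hdiv : PySem.Int.floordiv (i % 1000) 100 = i % 1000 / 100 :=
          PySem.Int.floordiv_eq_ediv_of_pos (by omega)
        have hrem : i % 1000 - PySem.Int.floordiv (i % 1000) 100 * 100 = i % 1000 % 100 := by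
          rw [hdiv]; omega
        have hcast : (((i % 1000 / 100).toNat : Nat) : Int) = i % 1000 / 100 := by omega
        have hname : PySem.Str.len (snamesA.getD (i % 1000 / 100) "")
            = onesB.getD (i % 1000 / 100) 0 := by
          rw [← hcast]; exact snames_len' _ (by omega) (by omega)
        rw [hrem, hdiv]
        rw [specials_len _ _ (by omega) (by omega)]
        by_cases hv : i % 1000 % 100 = 0
        · rw [if_neg (by simp [hv])]
          simp only [PySem.Str.len_append, hname, hnamet, htwo, len_hundred, len_thousand, len_nil]
          split_ifs <;> omega
        · rw [if_pos (by simp only [Bool.and_eq_true, bne_iff_ne, ne_eq, beq_self_eq_true, true_and]; exact hv)]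
          simp only [PySem.Str.len_append, hname, hnamet, htwo, len_hundred, len_thousand, len_and, len_nil]
          split_ifs <;> omega
theorem foldl_cons_eq_reverse_map {α β : Type} (f : α → β) :
    ∀ (l : List α) (acc : List β),
      l.foldl (fun a x => f x :: a) acc = (l.map f).reverse ++ acc := by
  intro l
  induction l with
  | nil => intro acc; simp
  | cons x t ih => intro acc; simp [ih]

theorem p017_eq_alt (n : Int) (hn : n ≤ 20999) : p017 n = p017_alt n := by
  rw [p017, p017_alt, PySem.List.foldl_add]
  have hbody : (PySem.List.pyRange 1 (n + 1) 1).foldl (fun wn i =>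
        if i == 0 then (i, "") :: wn else (i, wordForA i) :: wn)
        ([] : List (Int × String))
      = (PySem.List.pyRange 1 (n + 1) 1).foldl
          (fun wn i => (i, wordForA i) :: wn) [] := by
    apply PySem.List.foldl_congr_mem
    intro acc x hx
    have hx1 : 1 ≤ x := (PySem.List.mem_pyRange_one.mp hx).1
    have hx0 : (x == 0) = false := by simp; omega
    simp only [hx0, Bool.false_eq_true, if_false]
  rw [hbody, foldl_cons_eq_reverse_map (fun i => (i, wordForA i))]
  simp only [List.append_nil, List.reverse_reverse, List.map_map]
  have : (PySem.List.pyRange 1 (n + 1) 1).map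
        ((fun p : Int × String => PySem.Str.len p.2) ∘ fun i => (i, wordForA i))
      = (PySem.List.pyRange 1 (n + 1) 1).map countB := by
    apply List.map_congr_left
    intro x hx
    obtain ⟨hx1, hx2⟩ := PySem.List.mem_pyRange_one.mp hx
    exact word_len_eq_count x hx1 (by omega)
  rw [this]
  omega

-- ===== VERDICT (by name: the statement is the Claim_ definition above) =====
theorem p017_spec : Claim_equal_p017 := by
  intro n _ hpre
  unfold Spec_p017
  exact p017_eq_alt n hpre
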